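-- pv_equiv track=rewrite | github.com/Concerto-D/experiment_files | parameters/uptimes/generation_uptimes_mascots.py | add_overlaps_to_uptimes_distribution
-- ===== SOURCE A (Python) =====
-- import copy
--
-- offset = 5
--
-- def add_overlaps_to_uptimes_distribution(uptimes_distribution_per_node, overlaps_distribution_per_dep, duration_overlap):
--     uptimes_distribution_per_node_copy = copy.deepcopy(uptimes_distribution_per_node)
--     # Create overlaps dep/server for each round with overlap
--     deps_uptimes_distribution = uptimes_distribution_per_node_copy[1:]
--     for dep_num in range(len(overlaps_distribution_per_dep)):
--         for round_overlap in overlaps_distribution_per_dep[dep_num]: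
--             round_overlap, slot_overlap = round_overlap
--             # Should never get a NON_UP_ROUND
--             initial_uptime, slot_num = deps_uptimes_distribution[dep_num][round_overlap]
--             overlap_offset = offset + duration_overlap
--             updated_uptime = initial_uptime + (overlap_offset if slot_num == 0 else -overlap_offset)
--             deps_uptimes_distribution[dep_num][round_overlap] = (updated_uptime, slot_num)
--
--     return uptimes_distribution_per_node_copy
-- ===== SOURCE B (Python) =====
-- offset = 5
--
-- def add_overlaps_to_uptimes_distribution(uptimes_distribution_per_node, overlaps_distribution_per_dep, duration_overlap):
--     # aggregate: how many overlap entries hit each slot of each dep row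
--     counts = [[0] * len(row) for row in uptimes_distribution_per_node[1:]]
--     for i, rounds in enumerate(overlaps_distribution_per_dep):
--         for r, _ in rounds:
--             counts[i][r] += 1
--     # rebuild: fresh output, no deepcopy, one pass per row
--     off = offset + duration_overlap
--     result = [list(row) for row in uptimes_distribution_per_node[:1]]
--     for row, cs in zip(uptimes_distribution_per_node[1:], counts):
--         result.append([(u + (off if s == 0 else -off) * c, s) for (u, s), c in zip(row, cs)])
--     return result
-- ===== Notes on version B (the rewrite author's own statement) =====
-- stated objective: alternative
-- what changed: Replaces A's deepcopy-then-mutate-in-place (iterating overlaps and rewriting cells through the copy[1:] alias) with a single rebuild pass: the head row is carried over and each dep row is freshly constructed, adding the per-slot count of matching overlap entries times (offset + duration_overlap), signed by the slot number, so duplicates still apply cumulatively.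
import Mathlib
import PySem

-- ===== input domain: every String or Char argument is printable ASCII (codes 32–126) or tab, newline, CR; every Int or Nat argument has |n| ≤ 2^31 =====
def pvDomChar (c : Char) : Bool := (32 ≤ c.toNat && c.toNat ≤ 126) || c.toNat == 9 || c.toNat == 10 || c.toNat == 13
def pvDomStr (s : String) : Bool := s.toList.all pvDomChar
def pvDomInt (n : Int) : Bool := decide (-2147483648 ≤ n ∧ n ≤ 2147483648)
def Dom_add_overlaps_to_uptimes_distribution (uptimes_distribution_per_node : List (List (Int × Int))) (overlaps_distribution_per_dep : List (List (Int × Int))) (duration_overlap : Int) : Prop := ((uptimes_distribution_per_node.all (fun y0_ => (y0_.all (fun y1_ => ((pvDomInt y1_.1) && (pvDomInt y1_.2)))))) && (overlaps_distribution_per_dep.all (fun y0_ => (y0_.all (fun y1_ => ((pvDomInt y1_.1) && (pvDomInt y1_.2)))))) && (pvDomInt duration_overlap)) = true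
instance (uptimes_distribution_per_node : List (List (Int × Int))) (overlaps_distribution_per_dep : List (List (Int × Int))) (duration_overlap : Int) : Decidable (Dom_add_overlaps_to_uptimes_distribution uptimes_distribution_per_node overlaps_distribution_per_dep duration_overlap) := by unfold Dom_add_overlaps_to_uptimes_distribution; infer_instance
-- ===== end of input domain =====

-- B replaces A's deepcopy-then-mutate with aggregate-then-rebuild: first count how many overlap
-- entries hit each slot of each dep row, then build a fresh output in one pass; same return value
-- (A mutates only its own deepcopy, not the input).

-- ===== PORT A =====
-- A mutates `deps_uptimes_distribution = copy[1:]`, whose rows ALIAS the rows of the deepcopy;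
-- modelled exactly as updates at index dep_num+1 of the full list.  `offset` is the module
-- constant 5.  Where Python raises IndexError the `none` branches return the state unchanged —
-- those inputs are excluded by Pre_.
def aBody (duration_overlap : Int) (st : List (List (Int × Int))) (dep_num : Int) (ro : Int × Int) : List (List (Int × Int)) :=
  let round_overlap := ro.1
  match PySem.List.pyGet? st (dep_num + 1) with
  | none => st
  | some deprow =>
    match PySem.List.pyGet? deprow round_overlap with
    | none => st
    | some us =>
      let overlap_offset := 5 + duration_overlap
      let updated_uptime := us.1 + (if us.2 = 0 then overlap_offset else -overlap_offset)
      PySem.List.pySetD st (dep_num + 1) (PySem.List.pySetD deprow round_overlap (updated_uptime, us.2))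

def add_overlaps_to_uptimes_distribution (uptimes_distribution_per_node : List (List (Int × Int))) (overlaps_distribution_per_dep : List (List (Int × Int))) (duration_overlap : Int) : List (List (Int × Int)) :=
  (PySem.List.pyRange 0 (PySem.List.len overlaps_distribution_per_dep) 1).foldl
    (fun st dep_num =>
      (PySem.List.pyGetD overlaps_distribution_per_dep dep_num []).foldl
        (fun st2 ro => aBody duration_overlap st2 dep_num ro) st)
    uptimes_distribution_per_node

-- ===== PORT B =====
-- counts[i][r] += 1 — Python list indexing: negative r counts from the end, out of range raises
-- IndexError (the `none` branches; excluded by Pre_, exactly like A's raises).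
def bIncr (counts : List (List Int)) (i : Int) (r : Int) : List (List Int) :=
  match PySem.List.pyGet? counts i with
  | none => counts
  | some cs =>
    match PySem.List.pyGet? cs r with
    | none => counts
    | some c => PySem.List.pySetD counts i (PySem.List.pySetD cs r (c + 1))

def add_overlaps_to_uptimes_distribution_alt (uptimes_distribution_per_node : List (List (Int × Int))) (overlaps_distribution_per_dep : List (List (Int × Int))) (duration_overlap : Int) : List (List (Int × Int)) :=
  let counts := (PySem.List.enumerate overlaps_distribution_per_dep 0).foldl
    (fun counts ir => ir.2.foldl (fun cs rp => bIncr cs ir.1 rp.1) counts)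
    ((PySem.List.slice uptimes_distribution_per_node (some 1) none).map
      (fun row => List.replicate row.length (0 : Int)))
  let off := 5 + duration_overlap
  let result := (PySem.List.slice uptimes_distribution_per_node none (some 1)).map (fun row => row)
  result ++
    ((PySem.List.slice uptimes_distribution_per_node (some 1) none).zip counts).map
      (fun rc => (rc.1.zip rc.2).map
        (fun ec => (ec.1.1 + (if ec.1.2 = 0 then off else -off) * ec.2, ec.1.2)))

-- ===== PRECONDITION & SPEC =====
-- Pre_ = exactly the inputs on which A returns (no IndexError): every overlap entry for dep i
-- needs row i+1 to exist and its round index to be a valid Python index into that row.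
def Pre_add_overlaps_to_uptimes_distribution (uptimes_distribution_per_node : List (List (Int × Int))) (overlaps_distribution_per_dep : List (List (Int × Int))) (duration_overlap : Int) : Prop :=
  ∀ i : Nat, i < overlaps_distribution_per_dep.length →
    ∀ p ∈ overlaps_distribution_per_dep.getD i ([] : List (Int × Int)),
      i + 1 < uptimes_distribution_per_node.length ∧
      PySem.Raise.InRange (uptimes_distribution_per_node.getD (i+1) []).length p.1
instance (uptimes_distribution_per_node : List (List (Int × Int))) (overlaps_distribution_per_dep : List (List (Int × Int))) (duration_overlap : Int) : Decidable (Pre_add_overlaps_to_uptimes_distribution uptimes_distribution_per_node overlaps_distribution_per_dep duration_overlap) := by unfold Pre_add_overlaps_to_uptimes_distribution; infer_instance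

def pvWitness_add_overlaps_to_uptimes_distribution : (List (List (Int × Int))) × (List (List (Int × Int))) × Int :=
  ([[(0, 0)], [(1, 0), (2, 1)]], [[(0, 0), (-1, 1)]], 3)

def Spec_add_overlaps_to_uptimes_distribution (uptimes_distribution_per_node : List (List (Int × Int))) (overlaps_distribution_per_dep : List (List (Int × Int))) (duration_overlap : Int) (out : List (List (Int × Int))) : Prop := out = add_overlaps_to_uptimes_distribution_alt uptimes_distribution_per_node overlaps_distribution_per_dep duration_overlap
instance (uptimes_distribution_per_node : List (List (Int × Int))) (overlaps_distribution_per_dep : List (List (Int × Int))) (duration_overlap : Int) (out : List (List (Int × Int))) : Decidable (Spec_add_overlaps_to_uptimes_distribution uptimes_distribution_per_node overlaps_distribution_per_dep duration_overlap out) := by unfold Spec_add_overlaps_to_uptimes_distribution; infer_instance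

-- ===== CLAIM (what is proved, stated in full; the proofs are below) =====
def Claim_equal_add_overlaps_to_uptimes_distribution : Prop := ∀ (uptimes_distribution_per_node : List (List (Int × Int))) (overlaps_distribution_per_dep : List (List (Int × Int))) (duration_overlap : Int), Dom_add_overlaps_to_uptimes_distribution uptimes_distribution_per_node overlaps_distribution_per_dep duration_overlap → Pre_add_overlaps_to_uptimes_distribution uptimes_distribution_per_node overlaps_distribution_per_dep duration_overlap → Spec_add_overlaps_to_uptimes_distribution uptimes_distribution_per_node overlaps_distribution_per_dep duration_overlap (add_overlaps_to_uptimes_distribution uptimes_distribution_per_node overlaps_distribution_per_dep duration_overlap)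

-- ===== LEMMAS AND PROOFS =====

-- canonical index of a valid Python index i into a list of length n
def cIdx (n : Nat) (i : Int) : Nat := if 0 ≤ i then i.toNat else n - (-i).toNat

lemma cIdx_lt (n : Nat) (i : Int) (h : PySem.Raise.InRange n i) : cIdx n i < n := by
  obtain ⟨h1, h2⟩ := h
  unfold cIdx; split <;> omega

lemma pyGet?_valid {α : Type} (xs : List α) (i : Int) (h : PySem.Raise.InRange xs.length i) :
    PySem.List.pyGet? xs i = xs[cIdx xs.length i]? := by
  obtain ⟨h1, h2⟩ := h
  unfold cIdx
  by_cases hi : 0 ≤ i <;> simp [PySem.List.pyGet?, PySem.List.pyIdx?, hi, h1, h2]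

lemma pySetD_valid {α : Type} (xs : List α) (i : Int) (v : α) (h : PySem.Raise.InRange xs.length i) :
    PySem.List.pySetD xs i v = xs.set (cIdx xs.length i) v := by
  obtain ⟨h1, h2⟩ := h
  unfold cIdx
  by_cases hi : 0 ≤ i <;> simp [PySem.List.pySetD, PySem.List.pySet?, PySem.List.pyIdx?, hi, h1, h2]

lemma mod_eq_cIdx (n : Nat) (i : Int) (hn : 0 < n) (h : PySem.Raise.InRange n i) :
    PySem.Int.mod i (n : Int) = ((cIdx n i : Nat) : Int) := by
  obtain ⟨h1, h2⟩ := h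
  unfold cIdx
  rw [PySem.Int.mod_eq_emod_of_pos (show (0:Int) < (n:Int) by exact_mod_cast hn)]
  split
  · rw [Int.emod_eq_of_lt (by omega) h2]; omega
  · have : i % (n:Int) = i + n := by
      rw [show i = (i + n) - n by ring, Int.sub_emod_right, Int.emod_eq_of_lt (by omega) (by omega)]
      ring
    omega

-- number of overlap entries of `rounds` that hit slot k of a row of length n, as an Int
def hitCnt (rounds : List (Int × Int)) (n : Nat) (k : Nat) : Int :=
  (rounds.countP (fun rp => PySem.Int.mod rp.1 (n : Int) == (k : Int)) : Int)

--------------------------------------------------------------------------------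
-- A-side: one update on a single row; the row loop hits slot cIdx, cumulatively
--------------------------------------------------------------------------------

def updRow (off : Int) (row : List (Int × Int)) (r : Int) : List (Int × Int) :=
  match PySem.List.pyGet? row r with
  | none => row
  | some us => PySem.List.pySetD row r (us.1 + (if us.2 = 0 then off else -off), us.2)

lemma length_updRow (off : Int) (row : List (Int × Int)) (r : Int) :
    (updRow off row r).length = row.length := by
  unfold updRow
  cases h : PySem.List.pyGet? row r
  · rfl
  · exact PySem.List.length_pySetD ..

lemma updRow_valid (off : Int) (row : List (Int × Int)) (r : Int)
    (h : PySem.Raise.InRange row.length r) :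
    updRow off row r =
      row.set (cIdx row.length r)
        ((row[cIdx row.length r]'(cIdx_lt _ _ h)).1 +
           (if (row[cIdx row.length r]'(cIdx_lt _ _ h)).2 = 0 then off else -off),
         (row[cIdx row.length r]'(cIdx_lt _ _ h)).2) := by
  unfold updRow
  rw [pyGet?_valid _ _ h, List.getElem?_eq_getElem (cIdx_lt _ _ h)]
  exact pySetD_valid _ _ _ h

-- closed form of A's row loop: each slot moves by its hit count times the signed offset
def rowSpec (off : Int) (rounds row : List (Int × Int)) : List (Int × Int) :=
  row.mapIdx (fun k us =>
    (us.1 + (if us.2 = 0 then off else -off) * hitCnt rounds row.length k, us.2))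

lemma length_rowSpec (off : Int) (rounds row : List (Int × Int)) :
    (rowSpec off rounds row).length = row.length := by simp [rowSpec]

lemma getElem_rowSpec (off : Int) (rounds row : List (Int × Int)) (k : Nat) (hk : k < row.length) :
    (rowSpec off rounds row)[k]'(by simpa [length_rowSpec]) =
      (row[k].1 + (if row[k].2 = 0 then off else -off) * hitCnt rounds row.length k,
       row[k].2) := by
  simp [rowSpec]

lemma rowSpec_nil (off : Int) (row : List (Int × Int)) : rowSpec off [] row = row := by
  apply List.ext_getElem (by simp [length_rowSpec])
  intro k h1 h2
  rw [getElem_rowSpec _ _ _ _ h2]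
  simp [hitCnt]

lemma rowSpec_cons (off : Int) (p : Int × Int) (rounds row : List (Int × Int))
    (hp : PySem.Raise.InRange row.length p.1) :
    rowSpec off (p :: rounds) row = rowSpec off rounds (updRow off row p.1) := by
  have hn : 0 < row.length := by obtain ⟨h1, h2⟩ := hp; omega
  have hk0 := cIdx_lt _ _ hp
  apply List.ext_getElem (by simp [length_rowSpec, length_updRow])
  intro k h1 h2
  have hk : k < row.length := by simpa [length_rowSpec] using h1
  have hk' : k < (updRow off row p.1).length := by simpa [length_updRow] using hk
  rw [getElem_rowSpec _ _ _ _ hk, getElem_rowSpec _ _ _ _ hk']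
  simp only [hitCnt, updRow_valid _ _ _ hp, List.getElem_set, List.length_set, List.countP_cons,
    mod_eq_cIdx _ _ hn hp]
  by_cases hke : cIdx row.length p.1 = k
  · subst hke
    have hbeq : (((cIdx row.length p.1 : Nat) : Int) == ((cIdx row.length p.1 : Nat) : Int)) = true := by
      simp
    rw [hbeq]
    by_cases hs : (row[cIdx row.length p.1]'hk0).2 = 0 <;> simp [hs] <;> ring
  · have : (((cIdx row.length p.1 : Nat) : Int) == ((k : Nat) : Int)) = false := by
      simp; omega
    rw [this]
    simp [hke]

lemma rowFold_eq_rowSpec (off : Int) (rounds row : List (Int × Int))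
    (hv : ∀ p ∈ rounds, PySem.Raise.InRange row.length p.1) :
    rounds.foldl (fun r p => updRow off r p.1) row = rowSpec off rounds row := by
  induction rounds generalizing row with
  | nil => exact (rowSpec_nil off row).symm
  | cons p rest ih =>
    rw [List.foldl_cons, rowSpec_cons off p rest row (hv p (by simp))]
    exact ih _ (fun q hq => by
      rw [length_updRow]; exact hv q (List.mem_cons_of_mem _ hq))

-- the inner loop of A only rewrites row d+1, via the row-level loop
lemma innerFold_factor (dur : Int) (rounds : List (Int × Int)) (st : List (List (Int × Int))) (d : Nat)
    (hd : d + 1 < st.length)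
    (hv : ∀ p ∈ rounds, PySem.Raise.InRange (st[d+1]).length p.1) :
    rounds.foldl (fun st2 ro => aBody dur st2 (d : Int) ro) st =
      st.set (d+1) (rounds.foldl (fun r p => updRow (5 + dur) r p.1) st[d+1]) := by
  induction rounds generalizing st with
  | nil => simp
  | cons ro rest ih =>
    have hro := hv ro (by simp)
    have hcast : ((d : Int) + 1) = ((d + 1 : Nat) : Int) := by push_cast; ring
    have hget : PySem.List.pyGet? st ((d : Int) + 1) = some st[d+1] := by
      rw [hcast, PySem.List.pyGet?_natCast, List.getElem?_eq_getElem hd]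
    obtain ⟨us, hg⟩ : ∃ us, PySem.List.pyGet? st[d+1] ro.1 = some us := by
      rw [pyGet?_valid _ _ hro]
      exact ⟨_, List.getElem?_eq_getElem (cIdx_lt _ _ hro)⟩
    have hstep : aBody dur st (d : Int) ro = st.set (d+1) (updRow (5 + dur) st[d+1] ro.1) := by
      unfold aBody updRow
      simp only [hget, hg]
      rw [hcast, PySem.List.pySetD_natCast]
    rw [List.foldl_cons, hstep]
    rw [ih _ (by simpa using hd) (by
      intro q hq
      have : (st.set (d+1) (updRow (5 + dur) st[d+1] ro.1))[d+1]'(by simpa using hd)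
          = updRow (5 + dur) st[d+1] ro.1 := by simp
      rw [this, length_updRow]
      exact hv q (List.mem_cons_of_mem _ hq))]
    simp [List.set_set]

-- A after processing deps 0..m-1
def specN (dur : Int) (ov up : List (List (Int × Int))) (m : Nat) : List (List (Int × Int)) :=
  up.mapIdx (fun idx row =>
    if 1 ≤ idx ∧ idx ≤ m then (ov.getD (idx-1) []).foldl (fun r p => updRow (5 + dur) r p.1) row
    else row)

lemma length_specN (dur : Int) (ov up : List (List (Int × Int))) (m : Nat) :
    (specN dur ov up m).length = up.length := by simp [specN]

lemma outer_fold_eq_specN (dur : Int) (ov up : List (List (Int × Int)))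
    (hpre : Pre_add_overlaps_to_uptimes_distribution up ov dur) (m : Nat) (hm : m ≤ ov.length) :
    (List.range m).foldl
      (fun st (k : Nat) =>
        (PySem.List.pyGetD ov ((k : Nat) : Int) []).foldl
          (fun st2 ro => aBody dur st2 ((k : Nat) : Int) ro) st) up
    = specN dur ov up m := by
  induction m with
  | zero =>
    rw [List.range_zero, List.foldl_nil]
    apply List.ext_getElem (by simp [length_specN])
    intro k h1 h2
    simp only [specN, List.getElem_mapIdx]
    rw [if_neg (by omega)]
  | succ m ih =>
    rw [List.range_succ, List.foldl_append, ih (by omega), List.foldl_cons, List.foldl_nil]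
    rw [PySem.List.pyGetD_natCast]
    by_cases hnil : ov.getD m [] = []
    · rw [hnil, List.foldl_nil]
      apply List.ext_getElem (by simp [length_specN])
      intro k h1 h2
      simp only [specN, List.getElem_mapIdx]
      by_cases hk1 : k = m + 1
      · subst hk1
        by_cases hc : 1 ≤ m + 1 ∧ m + 1 ≤ m
        · omega
        · rw [if_neg hc, if_pos (by omega)]
          simp only [List.getD] at hnil
          simp [hnil]
      · have : (1 ≤ k ∧ k ≤ m) ↔ (1 ≤ k ∧ k ≤ m + 1) := by omega
        simp only [this]
    · obtain ⟨p0, hp0⟩ := List.exists_mem_of_ne_nil _ hnil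
      have hpm := hpre m (by omega)
      have hup : m + 1 < up.length := (hpm p0 hp0).1
      have hst : m + 1 < (specN dur ov up m).length := by rwa [length_specN]
      have hfix : (specN dur ov up m)[m+1]'hst = up[m+1] := by
        simp only [specN, List.getElem_mapIdx]
        rw [if_neg (by omega)]
      rw [innerFold_factor dur _ _ m hst (by
        intro q hq
        rw [hfix]
        have := (hpm q hq).2
        rwa [List.getD_eq_getElem _ _ hup] at this)]
      apply List.ext_getElem (by simp [length_specN])
      intro k h1 h2
      rw [List.getElem_set]
      by_cases hk1 : m + 1 = k
      · subst hk1
        rw [if_pos rfl, hfix]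
        simp only [specN, List.getElem_mapIdx]
        rw [if_pos (by omega)]
        simp
      · rw [if_neg hk1]
        simp only [specN, List.getElem_mapIdx]
        have : (1 ≤ k ∧ k ≤ m) ↔ (1 ≤ k ∧ k ≤ m + 1) := by omega
        simp only [this]

--------------------------------------------------------------------------------
-- B-side: the counts matrix ends up holding the hit counts
--------------------------------------------------------------------------------

def incRow (cs : List Int) (r : Int) : List Int :=
  match PySem.List.pyGet? cs r with
  | none => cs
  | some c => PySem.List.pySetD cs r (c + 1)

lemma length_incRow (cs : List Int) (r : Int) : (incRow cs r).length = cs.length := by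
  unfold incRow
  cases h : PySem.List.pyGet? cs r
  · rfl
  · exact PySem.List.length_pySetD ..

lemma incRow_valid (cs : List Int) (r : Int) (h : PySem.Raise.InRange cs.length r) :
    incRow cs r = cs.set (cIdx cs.length r) ((cs[cIdx cs.length r]'(cIdx_lt _ _ h)) + 1) := by
  unfold incRow
  rw [pyGet?_valid _ _ h, List.getElem?_eq_getElem (cIdx_lt _ _ h)]
  exact pySetD_valid _ _ _ h

-- closed form of B's counting row loop
def cntSpec (rounds : List (Int × Int)) (cs : List Int) : List Int :=
  cs.mapIdx (fun k c => c + hitCnt rounds cs.length k)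

lemma length_cntSpec (rounds : List (Int × Int)) (cs : List Int) :
    (cntSpec rounds cs).length = cs.length := by simp [cntSpec]

lemma getElem_cntSpec (rounds : List (Int × Int)) (cs : List Int) (k : Nat) (hk : k < cs.length) :
    (cntSpec rounds cs)[k]'(by simpa [length_cntSpec]) = cs[k] + hitCnt rounds cs.length k := by
  simp [cntSpec]

lemma cntSpec_nil (cs : List Int) : cntSpec [] cs = cs := by
  apply List.ext_getElem (by simp [length_cntSpec])
  intro k h1 h2
  rw [getElem_cntSpec _ _ _ h2]
  simp [hitCnt]

lemma cntSpec_cons (p : Int × Int) (rounds : List (Int × Int)) (cs : List Int)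
    (hp : PySem.Raise.InRange cs.length p.1) :
    cntSpec (p :: rounds) cs = cntSpec rounds (incRow cs p.1) := by
  have hn : 0 < cs.length := by obtain ⟨h1, h2⟩ := hp; omega
  have hk0 := cIdx_lt _ _ hp
  apply List.ext_getElem (by simp [length_cntSpec, length_incRow])
  intro k h1 h2
  have hk : k < cs.length := by simpa [length_cntSpec] using h1
  have hk' : k < (incRow cs p.1).length := by simpa [length_incRow] using hk
  rw [getElem_cntSpec _ _ _ hk, getElem_cntSpec _ _ _ hk']
  simp only [hitCnt, incRow_valid _ _ hp, List.getElem_set, List.length_set, List.countP_cons,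
    mod_eq_cIdx _ _ hn hp]
  by_cases hke : cIdx cs.length p.1 = k
  · subst hke
    have hbeq : (((cIdx cs.length p.1 : Nat) : Int) == ((cIdx cs.length p.1 : Nat) : Int)) = true := by
      simp
    rw [hbeq]
    simp
    ring
  · have : (((cIdx cs.length p.1 : Nat) : Int) == ((k : Nat) : Int)) = false := by
      simp; omega
    rw [this]
    simp [hke]

lemma cntFold_eq_cntSpec (rounds : List (Int × Int)) (cs : List Int)
    (hv : ∀ p ∈ rounds, PySem.Raise.InRange cs.length p.1) :
    rounds.foldl (fun c p => incRow c p.1) cs = cntSpec rounds cs := by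
  induction rounds generalizing cs with
  | nil => exact (cntSpec_nil cs).symm
  | cons p rest ih =>
    rw [List.foldl_cons, cntSpec_cons p rest cs (hv p (by simp))]
    exact ih _ (fun q hq => by
      rw [length_incRow]; exact hv q (List.mem_cons_of_mem _ hq))

-- the inner counting loop only rewrites counts row d
lemma innerCnt_factor (rounds : List (Int × Int)) (counts : List (List Int)) (d : Nat)
    (hd : d < counts.length)
    (hv : ∀ p ∈ rounds, PySem.Raise.InRange (counts[d]).length p.1) :
    rounds.foldl (fun c rp => bIncr c (d : Int) rp.1) counts =
      counts.set d (rounds.foldl (fun c p => incRow c p.1) counts[d]) := by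
  induction rounds generalizing counts with
  | nil => simp
  | cons ro rest ih =>
    have hro := hv ro (by simp)
    have hget : PySem.List.pyGet? counts (d : Int) = some counts[d] := by
      rw [PySem.List.pyGet?_natCast, List.getElem?_eq_getElem hd]
    obtain ⟨c, hg⟩ : ∃ c, PySem.List.pyGet? counts[d] ro.1 = some c := by
      rw [pyGet?_valid _ _ hro]
      exact ⟨_, List.getElem?_eq_getElem (cIdx_lt _ _ hro)⟩
    have hstep : bIncr counts (d : Int) ro.1 = counts.set d (incRow counts[d] ro.1) := by
      unfold bIncr incRow
      simp only [hget, hg]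
      rw [PySem.List.pySetD_natCast]
    rw [List.foldl_cons, hstep]
    rw [ih _ (by simpa using hd) (by
      intro q hq
      have : (counts.set d (incRow counts[d] ro.1))[d]'(by simpa using hd)
          = incRow counts[d] ro.1 := by simp
      rw [this, length_incRow]
      exact hv q (List.mem_cons_of_mem _ hq))]
    simp [List.set_set]

-- the counts matrix after processing overlap rows 0..m-1
def specC (ov : List (List (Int × Int))) (cs0 : List (List Int)) (m : Nat) : List (List Int) :=
  cs0.mapIdx (fun i cs => if i < m then cntSpec (ov.getD i []) cs else cs)

lemma length_specC (ov : List (List (Int × Int))) (cs0 : List (List Int)) (m : Nat) :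
    (specC ov cs0 m).length = cs0.length := by simp [specC]

lemma outer_cnt_eq_specC (ov : List (List (Int × Int))) (cs0 : List (List Int))
    (hv : ∀ i : Nat, i < ov.length → ∀ p ∈ ov.getD i [],
        i < cs0.length ∧ PySem.Raise.InRange ((cs0.getD i []).length) p.1)
    (m : Nat) (hm : m ≤ ov.length) :
    (List.range m).foldl
      (fun c (k : Nat) =>
        (PySem.List.pyGetD ov ((k : Nat) : Int) []).foldl
          (fun c2 rp => bIncr c2 ((k : Nat) : Int) rp.1) c) cs0
    = specC ov cs0 m := by
  induction m with
  | zero =>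
    rw [List.range_zero, List.foldl_nil]
    apply List.ext_getElem (by simp [length_specC])
    intro k h1 h2
    simp only [specC, List.getElem_mapIdx]
    rw [if_neg (by omega)]
  | succ m ih =>
    rw [List.range_succ, List.foldl_append, ih (by omega), List.foldl_cons, List.foldl_nil]
    rw [PySem.List.pyGetD_natCast]
    by_cases hnil : ov.getD m [] = []
    · rw [hnil, List.foldl_nil]
      apply List.ext_getElem (by simp [length_specC])
      intro k h1 h2
      simp only [specC, List.getElem_mapIdx]
      by_cases hk1 : m = k
      · subst hk1
        rw [if_neg (by omega), if_pos (by omega), hnil, cntSpec_nil]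
      · have : (k < m) ↔ (k < m + 1) := by omega
        simp only [this]
    · obtain ⟨p0, hp0⟩ := List.exists_mem_of_ne_nil _ hnil
      have hpm := hv m (by omega)
      obtain ⟨hup, -⟩ := hpm p0 hp0
      have hst : m < (specC ov cs0 m).length := by rwa [length_specC]
      have hfix : (specC ov cs0 m)[m]'hst = cs0[m]'hup := by
        simp only [specC, List.getElem_mapIdx]
        rw [if_neg (by omega)]
      rw [innerCnt_factor _ _ m hst (by
        intro q hq
        rw [hfix]
        have h := (hpm q hq).2
        rwa [List.getD_eq_getElem _ _ hup] at h)]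
      apply List.ext_getElem (by simp [length_specC])
      intro k h1 h2
      rw [List.getElem_set]
      by_cases hk1 : m = k
      · subst hk1
        rw [if_pos rfl, hfix]
        simp only [specC, List.getElem_mapIdx]
        rw [if_pos (by omega)]
        rw [cntFold_eq_cntSpec _ _ (fun q hq => by
          have h := (hpm q hq).2
          rwa [List.getD_eq_getElem _ _ hup] at h)]
      · rw [if_neg hk1]
        simp only [specC, List.getElem_mapIdx]
        have : (k < m) ↔ (k < m + 1) := by omega
        simp only [this]

--------------------------------------------------------------------------------
-- assembling both programs against the common closed form
--------------------------------------------------------------------------------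

lemma assemble (dur : Int) (ov : List (List (Int × Int))) (head : List (Int × Int))
    (deps : List (List (Int × Int)))
    (hpre : Pre_add_overlaps_to_uptimes_distribution (head :: deps) ov dur) :
    [head] ++
      (deps.zip (specC ov (deps.map (fun row => List.replicate row.length (0 : Int))) ov.length)).map
        (fun rc => (rc.1.zip rc.2).map
          (fun ec => (ec.1.1 + (if ec.1.2 = 0 then (5 + dur) else -(5 + dur)) * ec.2, ec.1.2)))
    = specN dur ov (head :: deps) ov.length := by
  set cs0 := deps.map (fun row => List.replicate row.length (0 : Int)) with hcs0
  have hlenC : (specC ov cs0 ov.length).length = deps.length := by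
    simp [length_specC, hcs0]
  apply List.ext_getElem (by simp [length_specN, List.length_zip, hlenC])
  intro k h1 h2
  match k with
  | 0 => simp [specN]
  | (j + 1) =>
    have hj : j < deps.length := by
      rw [length_specN] at h2
      simpa using h2
    have hjc : j < cs0.length := by simpa [hcs0] using hj
    have hcs0j : cs0[j]'hjc = List.replicate (deps[j]'hj).length 0 := by
      simp [hcs0]
    simp only [List.singleton_append, List.getElem_cons_succ, List.getElem_map, List.getElem_zip]
    simp only [specN, List.getElem_mapIdx, Nat.add_sub_cancel, List.getElem_cons_succ]
    have hspecCj : (specC ov cs0 ov.length)[j]'(by rwa [length_specC]) =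
        if j < ov.length then cntSpec (ov.getD j []) (cs0[j]'hjc) else cs0[j]'hjc := by
      simp only [specC, List.getElem_mapIdx]
    by_cases hc : j < ov.length
    · rw [if_pos (by omega)]
      have hval : ∀ p ∈ ov.getD j [], PySem.Raise.InRange (deps[j]'hj).length p.1 := by
        intro p hp
        have h := (hpre j hc p hp).2
        rwa [List.getD_cons_succ, List.getD_eq_getElem _ _ hj] at h
      rw [rowFold_eq_rowSpec _ _ _ hval]
      apply List.ext_getElem
      · simp [hspecCj, hc, length_cntSpec, hcs0j, length_rowSpec, List.length_zip]
      intro k' h1' h2'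
      have hk' : k' < (deps[j]'hj).length := by simpa [length_rowSpec] using h2'
      have hkc : k' < (cs0[j]'hjc).length := by simp [hcs0j]; omega
      rw [List.getElem_map, List.getElem_zip, getElem_rowSpec _ _ _ _ hk']
      simp only [hspecCj, if_pos hc]
      rw [getElem_cntSpec _ _ _ hkc]
      simp [hcs0j]
    · rw [if_neg (by omega)]
      apply List.ext_getElem
      · simp [hspecCj, hc, hcs0j, List.length_zip]
      intro k' h1' h2'
      have hkc : k' < (cs0[j]'hjc).length := by
        simp [hcs0j]; omega
      rw [List.getElem_map, List.getElem_zip]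
      simp only [hspecCj, if_neg hc]
      simp [hcs0j]

lemma alt_eq_specN (dur : Int) (ov up : List (List (Int × Int)))
    (hpre : Pre_add_overlaps_to_uptimes_distribution up ov dur) :
    add_overlaps_to_uptimes_distribution_alt up ov dur = specN dur ov up ov.length := by
  have hrange : PySem.List.pyRange 0 (PySem.List.len ov) 1
      = (List.range ov.length).map (fun k => ((k : Nat) : Int)) := by
    rw [PySem.List.pyRange_one]
    simp
  cases up with
  | nil =>
    unfold add_overlaps_to_uptimes_distribution_alt
    rw [PySem.List.slice_from_one, PySem.List.slice_to ([] : List (List (Int × Int))) (show (0:Int) ≤ 1 by norm_num)]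
    simp [specN]
  | cons head deps =>
    unfold add_overlaps_to_uptimes_distribution_alt
    rw [PySem.List.slice_from_one, PySem.List.slice_to (head :: deps) (show (0:Int) ≤ 1 by norm_num)]
    have hv : ∀ i : Nat, i < ov.length → ∀ p ∈ ov.getD i [],
        i < (deps.map (fun row => List.replicate row.length (0 : Int))).length ∧
        PySem.Raise.InRange (((deps.map (fun row => List.replicate row.length (0 : Int))).getD i []).length) p.1 := by
      intro i hi p hp
      obtain ⟨h1, h2⟩ := hpre i hi p hp
      have hid : i < deps.length := by simpa using h1
      refine ⟨by simpa using hid, ?_⟩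
      rw [List.getD_eq_getElem _ _ (by simpa using hid), List.getElem_map,
        List.length_replicate]
      rwa [List.getD_cons_succ, List.getD_eq_getElem _ _ hid] at h2
    rw [PySem.List.enumerate_eq_map_pyRange ov ([] : List (Int × Int)), hrange,
      List.foldl_map, List.foldl_map, List.tail_cons,
      outer_cnt_eq_specC ov _ hv ov.length le_rfl]
    simp only [show ((1 : Int)).toNat = 1 from rfl, List.take_succ_cons, List.take_zero,
      List.map_id']
    exact assemble dur ov head deps hpre

theorem add_overlaps_to_uptimes_distribution_spec : Claim_equal_add_overlaps_to_uptimes_distribution := by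
  intro up ov dur _hdom hpre
  unfold Spec_add_overlaps_to_uptimes_distribution
  unfold add_overlaps_to_uptimes_distribution
  have h1 : PySem.List.pyRange 0 (PySem.List.len ov) 1
      = (List.range ov.length).map (fun k => ((k : Nat) : Int)) := by
    rw [PySem.List.pyRange_one]
    simp
  rw [h1, List.foldl_map, outer_fold_eq_specN dur ov up hpre ov.length le_rfl,
    alt_eq_specN dur ov up hpre]
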